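-- pv_equiv track=rewrite | github.com/mtweiden/hybrid_partitioning | coupling.py | mesh
-- ===== SOURCE A (Python) =====
-- def mesh(
--     n : int,
--     m : int = None,
-- ) -> set[tuple[int]]:
--     """
--     Generate a 2D mesh coupling map.
--
--     Args:
--         n (int): If only n is provided, then this is the side length of a square
--             grid. Otherwise it is the number of rows in the mesh.
--
--         m (int|None): If m is provided, it is the number of columns in the mesh.
--
--     Returns:
--         coupling_map (set[tuple[int]]): The coupling map corresponding to the
--             2D nearest neighbor mesh that is nxn or nxm in dimensions.
--     """
--     cols = n if m is None else m
--     rows = n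
--
--     edges = set()
--     # Horizontals
--     for i in range(rows):
--         for j in range(cols-1):
--             edges.add((i*cols + j, i*cols + j+1))
--     # Verticals
--     for i in range(rows-1):
--         for j in range(cols):
--             edges.add((i*cols + j, i*cols + j+cols))
--     return edges
-- ===== SOURCE B (Python) =====
-- def mesh(
--     n : int,
--     m : int = None,
-- ) -> set[tuple[int]]:
--     """Mesh coupling map by unranking edges: the grid has nh = rows*(cols-1)
--     horizontal and nv = (rows-1)*cols vertical edges; one flat loop over the
--     edge ranks decodes rank e into its endpoint pair (divmod for horizontals,
--     the rank itself is the top endpoint for verticals)."""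
--     cols = n if m is None else m
--     rows = n
--     edges = set()
--     if rows <= 0 or cols <= 0:
--         return edges
--     nh = rows * (cols - 1)
--     nv = (rows - 1) * cols
--     for e in range(nh + nv):
--         if e < nh:
--             i, j = divmod(e, cols - 1)
--             k = i * cols + j
--             edges.add((k, k + 1))
--         else:
--             k = e - nh
--             edges.add((k, k + cols))
--     return edges
-- ===== Notes on version B (the rewrite author's own statement) =====
-- stated objective: alternative
-- what changed: Instead of scanning the grid nodes with nested row/column loops twice, B counts the edges (nh horizontal, nv vertical) and runs one flat loop over edge ranks, decoding each rank into its endpoint pair by divmod unranking; no nested loops and no per-node boundary scan.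
import Mathlib
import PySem

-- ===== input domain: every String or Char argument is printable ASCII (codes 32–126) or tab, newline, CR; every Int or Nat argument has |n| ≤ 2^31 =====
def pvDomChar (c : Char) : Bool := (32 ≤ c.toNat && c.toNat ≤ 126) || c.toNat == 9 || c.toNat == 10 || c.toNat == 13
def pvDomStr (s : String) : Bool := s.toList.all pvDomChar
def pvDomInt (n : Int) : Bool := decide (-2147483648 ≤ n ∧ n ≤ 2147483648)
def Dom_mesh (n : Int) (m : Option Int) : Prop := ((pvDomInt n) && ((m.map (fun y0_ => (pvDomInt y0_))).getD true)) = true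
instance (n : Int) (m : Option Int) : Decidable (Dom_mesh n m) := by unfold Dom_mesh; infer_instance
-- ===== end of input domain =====

-- B replaces A's two nested row/column grid scans by one flat loop over EDGE RANKS:
-- it counts nh horizontal and nv vertical edges and decodes each rank by divmod
-- unranking into its endpoint pair — objective: alternative decomposition, same cost.

-- ===== PORT A =====
def mesh (n : Int) (m : Option Int) : List (Int × Int) :=
  let cols := match m with | none => n | some m' => m'
  let rows := n
  let edges : PySem.Set (Int × Int) := PySem.Set.empty
  -- Horizontals
  let edges := (PySem.List.pyRange 0 rows 1).foldl (fun edges i =>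
    (PySem.List.pyRange 0 (cols - 1) 1).foldl (fun edges j =>
      PySem.Set.add edges (i * cols + j, i * cols + j + 1)) edges) edges
  -- Verticals
  let edges := (PySem.List.pyRange 0 (rows - 1) 1).foldl (fun edges i =>
    (PySem.List.pyRange 0 cols 1).foldl (fun edges j =>
      PySem.Set.add edges (i * cols + j, i * cols + j + cols)) edges) edges
  edges

-- ===== PORT B =====
def mesh_alt (n : Int) (m : Option Int) : List (Int × Int) :=
  let cols := match m with | none => n | some m' => m'
  let rows := n
  let edges : PySem.Set (Int × Int) := PySem.Set.empty
  if rows ≤ 0 ∨ cols ≤ 0 then edges else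
    let nh := rows * (cols - 1)
    let nv := (rows - 1) * cols
    (PySem.List.pyRange 0 (nh + nv) 1).foldl (fun edges e =>
      if e < nh then
        -- i, j = divmod(e, cols - 1)  (divisor > 0 here since e < nh forces cols > 1)
        let i := PySem.Int.floordiv e (cols - 1)
        let j := PySem.Int.mod e (cols - 1)
        let k := i * cols + j
        PySem.Set.add edges (k, k + 1)
      else
        let k := e - nh
        PySem.Set.add edges (k, k + cols)) edges

-- ===== PRECONDITION & SPEC =====
def Spec_mesh (n : Int) (m : Option Int) (out : List (Int × Int)) : Prop := out = mesh_alt n m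
instance (n : Int) (m : Option Int) (out : List (Int × Int)) : Decidable (Spec_mesh n m out) := by unfold Spec_mesh; infer_instance

-- ===== CLAIM (what is proved, stated in full; the proofs are below) =====
def Claim_equal_mesh : Prop := ∀ (n : Int) (m : Option Int), Dom_mesh n m → Spec_mesh n m (mesh n m)

-- ===== LEMMAS AND PROOFS =====

-- one row of horizontal edges / of vertical edges, and their accumulations over the first r rows
def hrow (c i : Int) : List (Int × Int) :=
  (PySem.List.pyRange 0 (c - 1) 1).map (fun j => (i * c + j, i * c + j + 1))
def vrow (c i : Int) : List (Int × Int) :=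
  (PySem.List.pyRange 0 c 1).map (fun j => (i * c + j, i * c + j + c))
def hpart (c : Int) (r : Nat) : List (Int × Int) :=
  (PySem.List.pyRange 0 (r : Int) 1).flatMap (hrow c)
def vpart (c : Int) (r : Nat) : List (Int × Int) :=
  (PySem.List.pyRange 0 (r : Int) 1).flatMap (vrow c)

-- B's horizontal unranking function
def unrk (c e : Int) : Int × Int :=
  (PySem.Int.floordiv e (c - 1) * c + PySem.Int.mod e (c - 1),
   PySem.Int.floordiv e (c - 1) * c + PySem.Int.mod e (c - 1) + 1)

lemma mem_hpart {c : Int} {r : Nat} {p : Int × Int} (h : p ∈ hpart c r) :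
    ∃ i j : Int, 0 ≤ i ∧ i < (r : Int) ∧ 0 ≤ j ∧ j < c - 1 ∧ p = (i * c + j, i * c + j + 1) := by
  simp only [hpart, List.mem_flatMap, hrow, List.mem_map, PySem.List.mem_pyRange_one] at h
  obtain ⟨i, ⟨hi0, hi1⟩, j, ⟨hj0, hj1⟩, hp⟩ := h
  exact ⟨i, j, hi0, hi1, hj0, hj1, hp.symm⟩

lemma mem_vpart {c : Int} {r : Nat} {p : Int × Int} (h : p ∈ vpart c r) :
    ∃ i j : Int, 0 ≤ i ∧ i < (r : Int) ∧ 0 ≤ j ∧ j < c ∧ p = (i * c + j, i * c + j + c) := by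
  simp only [vpart, List.mem_flatMap, vrow, List.mem_map, PySem.List.mem_pyRange_one] at h
  obtain ⟨i, ⟨hi0, hi1⟩, j, ⟨hj0, hj1⟩, hp⟩ := h
  exact ⟨i, j, hi0, hi1, hj0, hj1, hp.symm⟩

lemma hrow_nodup (c i : Int) : (hrow c i).Nodup := by
  refine List.Nodup.map ?_ (PySem.List.nodup_pyRange_one _ _)
  intro a b h
  simpa using congrArg Prod.fst h

lemma vrow_nodup (c i : Int) : (vrow c i).Nodup := by
  refine List.Nodup.map ?_ (PySem.List.nodup_pyRange_one _ _)
  intro a b h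
  simpa using congrArg Prod.fst h

lemma hpart_fst_lt {c : Int} (hc : 0 < c) {r : Nat} {p : Int × Int} (h : p ∈ hpart c r) :
    p.1 < (r : Int) * c := by
  obtain ⟨i, j, hi0, hi1, hj0, hj1, hp⟩ := mem_hpart h
  have : i + 1 ≤ (r : Int) := hi1
  subst hp
  simp only []
  nlinarith

lemma vpart_fst_lt {c : Int} (hc : 0 < c) {r : Nat} {p : Int × Int} (h : p ∈ vpart c r) :
    p.1 < (r : Int) * c := by
  obtain ⟨i, j, hi0, hi1, hj0, hj1, hp⟩ := mem_vpart h
  have : i + 1 ≤ (r : Int) := hi1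
  subst hp
  simp only []
  nlinarith

-- a vertical-shaped edge (p.2 = p.1 + c) is never a horizontal edge
lemma not_mem_hpart_of_vshape {c : Int} {r : Nat} {p : Int × Int}
    (hsh : p.2 = p.1 + c) (h : p ∈ hpart c r) : False := by
  obtain ⟨i, j, _, _, hj0, hj1, hp⟩ := mem_hpart h
  subst hp
  simp only [] at hsh
  omega

-- A's horizontal double loop accumulates exactly the first r rows of horizontal edges
lemma foldH (c : Int) (hc : 0 < c) (r : Nat) :
    (PySem.List.pyRange 0 (r : Int) 1).foldl (fun e i =>
      (PySem.List.pyRange 0 (c - 1) 1).foldl (fun e j =>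
        PySem.Set.add e (i * c + j, i * c + j + 1)) e) PySem.Set.empty = hpart c r := by
  induction r with
  | zero => simp [PySem.List.pyRange_one_eq_nil, hpart]
  | succ k ih =>
    have hcast : ((k + 1 : Nat) : Int) = (k : Int) + 1 := by push_cast; ring
    rw [hcast, PySem.List.pyRange_one_succ_right (by positivity), List.foldl_append, ih]
    simp only [List.foldl_cons, List.foldl_nil]
    rw [← PySem.Set.update_map_eq_foldl_add]
    have hfresh : ∀ x ∈ hrow c (k : Int), x ∉ hpart c k := by
      intro x hx hmem
      have hlt := hpart_fst_lt hc hmem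
      simp only [hrow, List.mem_map, PySem.List.mem_pyRange_one] at hx
      obtain ⟨j, ⟨hj0, _⟩, hx⟩ := hx
      subst hx
      simp only [] at hlt
      nlinarith
    rw [show List.map (fun j => ((k:Int) * c + j, (k:Int) * c + j + 1)) (PySem.List.pyRange 0 (c-1) 1) = hrow c (k : Int) from rfl,
        PySem.Set.update_eq_append_of_disjoint _ _ (hrow_nodup c _) hfresh]
    rw [hpart, hpart, hcast, PySem.List.pyRange_one_succ_right (by positivity), List.flatMap_append]
    simp

-- A's vertical double loop appends exactly the first s rows of vertical edges
lemma foldV (c : Int) (hc : 0 < c) (R : Nat) (s : Nat) :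
    (PySem.List.pyRange 0 (s : Int) 1).foldl (fun e i =>
      (PySem.List.pyRange 0 c 1).foldl (fun e j =>
        PySem.Set.add e (i * c + j, i * c + j + c)) e) (hpart c R) = hpart c R ++ vpart c s := by
  induction s with
  | zero => simp [PySem.List.pyRange_one_eq_nil, vpart]
  | succ k ih =>
    have hcast : ((k + 1 : Nat) : Int) = (k : Int) + 1 := by push_cast; ring
    rw [hcast, PySem.List.pyRange_one_succ_right (by positivity), List.foldl_append, ih]
    simp only [List.foldl_cons, List.foldl_nil]
    rw [← PySem.Set.update_map_eq_foldl_add]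
    have hfresh : ∀ x ∈ vrow c (k : Int), x ∉ hpart c R ++ vpart c k := by
      intro x hx hmem
      simp only [vrow, List.mem_map, PySem.List.mem_pyRange_one] at hx
      obtain ⟨j, ⟨hj0, hj1⟩, hx⟩ := hx
      rcases List.mem_append.mp hmem with hh | hv
      · exact not_mem_hpart_of_vshape (by rw [← hx]) hh
      · have hlt := vpart_fst_lt hc hv
        rw [← hx] at hlt
        simp only [] at hlt
        nlinarith
    rw [show List.map (fun j => ((k:Int) * c + j, (k:Int) * c + j + c)) (PySem.List.pyRange 0 c 1) = vrow c (k : Int) from rfl,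
        PySem.Set.update_eq_append_of_disjoint _ _ (vrow_nodup c _) hfresh]
    rw [vpart, vpart, hcast, PySem.List.pyRange_one_succ_right (by positivity), List.flatMap_append]
    simp

-- unranking a rank inside block i of width c-1 yields the j-th horizontal edge of row i
lemma unrk_block (c : Int) (hc : 1 < c) (i : Int) :
    (PySem.List.pyRange (i * (c - 1)) ((i + 1) * (c - 1)) 1).map (unrk c) = hrow c i := by
  have hw : 0 < c - 1 := by omega
  have hspan : ((i + 1) * (c - 1) - i * (c - 1)).toNat = (c - 1).toNat := by
    have h : (i + 1) * (c - 1) - i * (c - 1) = c - 1 := by ring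
    rw [h]
  rw [PySem.List.pyRange_one, hspan, hrow, PySem.List.pyRange_one]
  simp only [List.map_map, Int.sub_zero]
  refine List.map_congr_left (fun k hk => ?_)
  simp only [List.mem_range] at hk
  have hk' : (k : Int) < c - 1 := by omega
  have hdiv : PySem.Int.floordiv (i * (c - 1) + (k : Int)) (c - 1) = i := by
    rw [PySem.Int.floordiv_eq_iff_of_pos hw]
    constructor
    · linarith
    · nlinarith
  have hmod : PySem.Int.mod (i * (c - 1) + (k : Int)) (c - 1) = (k : Int) := by
    have h2 := PySem.Int.floordiv_mul_add_mod (i * (c - 1) + (k : Int)) (c - 1)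
    rw [hdiv] at h2
    linarith
  simp only [Function.comp, unrk, hdiv, hmod]
  norm_num

-- B's flat horizontal unranking pass equals the nested horizontal accumulation
lemma hflat (c : Int) (hc : 1 < c) (r : Nat) :
    ((PySem.List.pyRange 0 ((r : Int) * (c - 1)) 1).map (unrk c)) = hpart c r := by
  have hw : 0 < c - 1 := by omega
  induction r with
  | zero => simp [PySem.List.pyRange_one_eq_nil, hpart]
  | succ k ih =>
    have hcast : ((k + 1 : Nat) : Int) = (k : Int) + 1 := by push_cast; ring
    rw [hcast, PySem.List.pyRange_one_append 0 ((k : Int) * (c - 1)) (((k : Int) + 1) * (c - 1))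
          (by positivity) (by nlinarith),
        List.map_append, ih, unrk_block c hc (k : Int)]
    rw [hpart, hpart, hcast, PySem.List.pyRange_one_succ_right (by positivity), List.flatMap_append]
    simp

-- with nothing between grid points, hpart over a 1-column grid is empty
lemma hpart_one (r : Nat) : hpart 1 r = [] := by
  have h : hrow 1 = fun _ => ([] : List (Int × Int)) := by
    funext i
    simp [hrow, PySem.List.pyRange_one_eq_nil]
  simp [hpart, h]

-- the first endpoint of an unranked horizontal edge is strictly monotone in the rank
lemma unrk_fst (c e : Int) :
    (unrk c e).1 = e + PySem.Int.floordiv e (c - 1) := by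
  have h := PySem.Int.floordiv_mul_add_mod e (c - 1)
  simp only [unrk]
  linear_combination h

lemma floordiv_mono (a b d : Int) (hd : 0 < d) (h : a ≤ b) :
    PySem.Int.floordiv a d ≤ PySem.Int.floordiv b d := by
  rw [PySem.Int.le_floordiv_iff_mul_le hd]
  have hb := ((PySem.Int.floordiv_eq_iff_of_pos hd).mp (rfl : PySem.Int.floordiv a d = _)).1
  linarith

lemma hpart_nodup (c : Int) (hc : 0 < c) (r : Nat) : (hpart c r).Nodup := by
  rcases eq_or_lt_of_le (by omega : (1:Int) ≤ c) with h1 | h1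
  · rw [← h1, hpart_one]
    exact List.nodup_nil
  · rw [← hflat c h1 r]
    have hmono : ∀ a b : Int, a < b → (unrk c a).1 < (unrk c b).1 := by
      intro a b hab
      rw [unrk_fst, unrk_fst]
      have := floordiv_mono a b (c - 1) (by omega) hab.le
      omega
    have hpw : ((PySem.List.pyRange 0 ((r : Int) * (c - 1)) 1).map (unrk c)).Pairwise
        (fun p q => p.1 < q.1) :=
      List.Pairwise.map _ (fun {a b} h => hmono a b h)
        (PySem.List.pairwise_lt_pyRange_one _ _)
    exact List.Pairwise.imp (fun h => by intro he; rw [he] at h; omega) hpw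

-- the vertical ranks, shifted down by nh, are the flat top endpoints in order
lemma vshift (c nh nv : Int) :
    (PySem.List.pyRange nh (nh + nv) 1).map (fun e => (e - nh, e - nh + c))
      = (PySem.List.pyRange 0 nv 1).map (fun k => (k, k + c)) := by
  rw [PySem.List.pyRange_one, PySem.List.pyRange_one]
  have : nh + nv - nh = nv - 0 := by ring
  rw [this]
  simp only [List.map_map]
  refine List.map_congr_left (fun k _ => ?_)
  simp only [Function.comp, Prod.mk.injEq]
  constructor <;> omega

-- B's flat vertical tail equals the nested vertical accumulation
lemma vflat (c : Int) (hc : 0 < c) (r : Nat) :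
    (PySem.List.pyRange 0 ((r : Int) * c) 1).map (fun k => (k, k + c)) = vpart c r := by
  induction r with
  | zero => simp [PySem.List.pyRange_one_eq_nil, vpart]
  | succ k ih =>
    have hcast : ((k + 1 : Nat) : Int) = (k : Int) + 1 := by push_cast; ring
    rw [hcast, PySem.List.pyRange_one_append 0 ((k : Int) * c) (((k : Int) + 1) * c)
          (by positivity) (by nlinarith),
        List.map_append, ih]
    have hspan : (((k : Int) + 1) * c - (k : Int) * c).toNat = c.toNat := by
      have h : ((k : Int) + 1) * c - (k : Int) * c = c := by ring
      rw [h]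
    have hblock : (PySem.List.pyRange ((k : Int) * c) (((k : Int) + 1) * c) 1).map
        (fun x => (x, x + c)) = vrow c (k : Int) := by
      rw [PySem.List.pyRange_one, hspan, vrow, PySem.List.pyRange_one]
      simp only [List.map_map, Int.sub_zero]
      exact List.map_congr_left (fun j _ => by simp [Function.comp])
    rw [hblock, vpart, vpart, hcast, PySem.List.pyRange_one_succ_right (by positivity),
        List.flatMap_append]
    simp

-- the two ports agree for arbitrary rows n and cols c
lemma main_eq (n c : Int) :
    ((PySem.List.pyRange 0 (n - 1) 1).foldl (fun e i =>
        (PySem.List.pyRange 0 c 1).foldl (fun e j =>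
          PySem.Set.add e (i * c + j, i * c + j + c)) e)
      ((PySem.List.pyRange 0 n 1).foldl (fun e i =>
        (PySem.List.pyRange 0 (c - 1) 1).foldl (fun e j =>
          PySem.Set.add e (i * c + j, i * c + j + 1)) e) PySem.Set.empty))
    = (if n ≤ 0 ∨ c ≤ 0 then ([] : List (Int × Int)) else
        (PySem.List.pyRange 0 (n * (c - 1) + (n - 1) * c) 1).foldl (fun edges e =>
          if e < n * (c - 1) then
            PySem.Set.add edges
              (PySem.Int.floordiv e (c - 1) * c + PySem.Int.mod e (c - 1),
               PySem.Int.floordiv e (c - 1) * c + PySem.Int.mod e (c - 1) + 1)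
          else
            PySem.Set.add edges (e - n * (c - 1), e - n * (c - 1) + c)) PySem.Set.empty) := by
  by_cases hpos : 0 < n ∧ 0 < c
  · obtain ⟨hn, hc⟩ := hpos
    rw [if_neg (by omega)]
    obtain ⟨r, hr⟩ : ∃ r : Nat, (r : Int) = n := ⟨n.toNat, Int.toNat_of_nonneg hn.le⟩
    have hr1 : 1 ≤ r := by omega
    have hrsub : ((r - 1 : Nat) : Int) = n - 1 := by omega
    have hnh : 0 ≤ n * (c - 1) := by nlinarith
    have hnv : 0 ≤ (n - 1) * c := by nlinarith
    -- A's side: horizontals then verticals, row by row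
    rw [← hrsub, ← hr, foldH c hc r, foldV c hc r (r - 1)]
    rw [hr, hrsub]
    -- B's side: split the rank range at nh and unrank each part
    rw [PySem.List.pyRange_one_append 0 (n * (c - 1)) (n * (c - 1) + (n - 1) * c) hnh
          (by omega), List.foldl_append]
    have h1 := PySem.List.foldl_congr_mem (PySem.List.pyRange 0 (n * (c - 1)) 1)
      (fun edges e =>
        if e < n * (c - 1) then
          PySem.Set.add edges
            (PySem.Int.floordiv e (c - 1) * c + PySem.Int.mod e (c - 1),
             PySem.Int.floordiv e (c - 1) * c + PySem.Int.mod e (c - 1) + 1)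
        else PySem.Set.add edges (e - n * (c - 1), e - n * (c - 1) + c))
      (fun s e => PySem.Set.add s (unrk c e)) PySem.Set.empty
      (by intro acc x hx
          have hlt := (PySem.List.mem_pyRange_one.mp hx).2
          simp only [if_pos hlt, unrk])
    rw [h1]
    have h2 := PySem.List.foldl_congr_mem
      (PySem.List.pyRange (n * (c - 1)) (n * (c - 1) + (n - 1) * c) 1)
      (fun edges e =>
        if e < n * (c - 1) then
          PySem.Set.add edges
            (PySem.Int.floordiv e (c - 1) * c + PySem.Int.mod e (c - 1),
             PySem.Int.floordiv e (c - 1) * c + PySem.Int.mod e (c - 1) + 1)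
        else PySem.Set.add edges (e - n * (c - 1), e - n * (c - 1) + c))
      (fun s e => PySem.Set.add s (e - n * (c - 1), e - n * (c - 1) + c))
      ((PySem.List.pyRange 0 (n * (c - 1)) 1).foldl
        (fun s e => PySem.Set.add s (unrk c e)) PySem.Set.empty)
      (by intro acc x hx
          have hge := (PySem.List.mem_pyRange_one.mp hx).1
          simp only [if_neg (by omega : ¬ x < n * (c - 1))])
    rw [h2]
    have hmapu : (PySem.List.pyRange 0 (n * (c - 1)) 1).map (unrk c) = hpart c r := by
      rcases eq_or_lt_of_le (by omega : (1:Int) ≤ c) with h1 | h1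
      · rw [← h1]
        simp [PySem.List.pyRange_one_eq_nil, hpart_one]
      · rw [← hr]
        exact hflat c h1 r
    have hmapv : (PySem.List.pyRange (n * (c - 1)) (n * (c - 1) + (n - 1) * c) 1).map
        (fun e => (e - n * (c - 1), e - n * (c - 1) + c)) = vpart c (r - 1) := by
      rw [vshift c (n * (c - 1)) ((n - 1) * c)]
      have : (n - 1) * c = ((r - 1 : Nat) : Int) * c := by rw [hrsub]
      rw [this]
      exact vflat c hc (r - 1)
    rw [← PySem.Set.update_map_eq_foldl_add, ← PySem.Set.update_map_eq_foldl_add,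
        hmapu, hmapv]
    rw [PySem.Set.update_empty, PySem.Set.ofList_eq_self_of_nodup _ (hpart_nodup c hc r),
        PySem.Set.update_eq_append_of_disjoint _ _ ?_ ?_]
    · rw [← vflat c hc (r - 1)]
      refine List.Nodup.map ?_ (PySem.List.nodup_pyRange_one _ _)
      intro a b h
      simpa using congrArg Prod.fst h
    · intro x hx hmem
      obtain ⟨i, j, _, _, _, _, hxeq⟩ := mem_vpart hx
      exact not_mem_hpart_of_vshape (by rw [hxeq]) hmem
  · rw [if_pos (by omega)]
    by_cases hn : n ≤ 0
    · rw [PySem.List.pyRange_one_eq_nil hn, PySem.List.pyRange_one_eq_nil (by omega : n - 1 ≤ 0)]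
      rfl
    · have hc : c ≤ 0 := by omega
      rw [PySem.List.pyRange_one_eq_nil hc, PySem.List.pyRange_one_eq_nil (by omega : c - 1 ≤ 0)]
      simp only [List.foldl_nil]
      rw [List.foldl_fixed, List.foldl_fixed]
      rfl

-- ===== VERDICT (by name: the statement is the Claim_ definition above) =====
theorem mesh_spec : Claim_equal_mesh := by
  intro n m _
  unfold Spec_mesh
  cases m with
  | none => exact main_eq n n
  | some mm => exact main_eq n mm
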